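-- pv_equiv track=rewrite | github.com/Naofumi-1000ri/douga | backend/src/services/semantic_check_service.py | _match_keywords_to_assets
-- ===== SOURCE A (Python) =====
-- def _match_keywords_to_assets(
--     keywords: list[str], asset_names: list[str]
-- ) -> list[str]:
--     """Check if any keywords appear in asset names."""
--     matched: list[str] = []
--     for kw in keywords:
--         for name in asset_names:
--             if kw in name.lower():
--                 matched.append(kw)
--                 break
--     return matched
-- ===== SOURCE B (Python) =====
-- def _match_keywords_to_assets(
--     keywords: list[str], asset_names: list[str]
-- ) -> list[str]:
--     """Index every substring of the lowercased asset names once; each keyword is then one set lookup."""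
--     subs = set()
--     for name in asset_names:
--         low = name.lower()
--         n = len(low)
--         for i in range(n + 1):
--             for j in range(i, n + 1):
--                 subs.add(low[i:j])
--     return [kw for kw in keywords if kw in subs]
-- ===== Notes on version B (the rewrite author's own statement) =====
-- stated objective: faster
-- what changed: B builds a hash set of all substrings of the lowercased asset names once and answers each keyword with a single set lookup, instead of A's per-keyword scan over every asset name with an inner substring search.
import Mathlib
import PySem

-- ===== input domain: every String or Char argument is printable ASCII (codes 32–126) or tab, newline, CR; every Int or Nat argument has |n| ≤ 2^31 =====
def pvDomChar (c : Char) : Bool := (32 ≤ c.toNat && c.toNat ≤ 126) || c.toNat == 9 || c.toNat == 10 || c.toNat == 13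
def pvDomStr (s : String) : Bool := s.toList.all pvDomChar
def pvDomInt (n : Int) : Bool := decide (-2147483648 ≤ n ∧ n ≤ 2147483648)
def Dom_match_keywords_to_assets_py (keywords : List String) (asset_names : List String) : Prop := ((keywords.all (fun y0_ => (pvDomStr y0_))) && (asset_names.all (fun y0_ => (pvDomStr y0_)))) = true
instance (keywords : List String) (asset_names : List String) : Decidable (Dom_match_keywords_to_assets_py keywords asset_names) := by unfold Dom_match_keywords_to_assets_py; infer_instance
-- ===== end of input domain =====

-- B replaces A's per-keyword scan over all asset names by a substring index built once
-- (a set of every substring of the lowercased names), queried per keyword; same result, alternative algorithm.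

-- ===== PORT A =====
-- inner 'for name in asset_names: … break' loop of A
def pvAInner (kw : String) (matched : List String) : List String → List String
  | [] => matched
  | name :: rest =>
      if PySem.Str.isIn kw (PySem.Str.lower name) then matched ++ [kw]
      else pvAInner kw matched rest

def match_keywords_to_assets_py (keywords : List String) (asset_names : List String) : List String :=
  keywords.foldl (fun matched kw => pvAInner kw matched asset_names) []

-- ===== PORT B =====
-- the substring index: set of all low[i:j]
def pvSubsIndex (asset_names : List String) : PySem.Set String :=
  asset_names.foldl (fun subs name =>
    let low := PySem.Str.lower name
    let n : Int := PySem.Str.len low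
    (PySem.List.pyRange 0 (n + 1) 1).foldl (fun subs i =>
      (PySem.List.pyRange i (n + 1) 1).foldl (fun subs j =>
        PySem.Set.add subs (PySem.Str.slice low (some i) (some j))) subs) subs)
    PySem.Set.empty

def match_keywords_to_assets_py_alt (keywords : List String) (asset_names : List String) : List String :=
  let subs := pvSubsIndex asset_names
  keywords.filter (fun kw => PySem.Set.contains subs kw)

-- ===== PRECONDITION & SPEC =====
def Spec_match_keywords_to_assets_py (keywords : List String) (asset_names : List String) (out : List String) : Prop := out = match_keywords_to_assets_py_alt keywords asset_names
instance (keywords : List String) (asset_names : List String) (out : List String) : Decidable (Spec_match_keywords_to_assets_py keywords asset_names out) := by unfold Spec_match_keywords_to_assets_py; infer_instance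

-- ===== CLAIM (what is proved, stated in full; the proofs are below) =====
def Claim_equal_match_keywords_to_assets_py : Prop := ∀ (keywords : List String) (asset_names : List String), Dom_match_keywords_to_assets_py keywords asset_names → Spec_match_keywords_to_assets_py keywords asset_names (match_keywords_to_assets_py keywords asset_names)

-- ===== LEMMAS AND PROOFS =====

-- A's inner loop appends kw iff some name matches
theorem pvAInner_eq (kw : String) (matched : List String) (names : List String) :
    pvAInner kw matched names =
      if names.any (fun name => PySem.Str.isIn kw (PySem.Str.lower name)) then matched ++ [kw] else matched := by
  induction names with
  | nil => simp [pvAInner]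
  | cons name rest ih =>
      simp only [pvAInner, List.any_cons, Bool.or_eq_true]
      by_cases h : PySem.Str.isIn kw (PySem.Str.lower name) = true
      · rw [if_pos h, if_pos (Or.inl h)]
      · rw [if_neg h, ih]
        by_cases h2 : (rest.any fun n => PySem.Str.isIn kw (PySem.Str.lower n)) = true
        · rw [if_pos h2, if_pos (Or.inr h2)]
        · rw [if_neg h2, if_neg (by tauto)]

theorem pvA_eq_filter (keywords asset_names : List String) :
    match_keywords_to_assets_py keywords asset_names =
      keywords.filter (fun kw => asset_names.any (fun name => PySem.Str.isIn kw (PySem.Str.lower name))) := by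
  unfold match_keywords_to_assets_py
  have h : (fun (matched : List String) (kw : String) => pvAInner kw matched asset_names)
      = (fun matched kw => if asset_names.any (fun name => PySem.Str.isIn kw (PySem.Str.lower name)) then matched ++ [kw] else matched) := by
    funext matched kw; exact pvAInner_eq kw matched asset_names
  rw [h, PySem.List.foldl_append_if_eq_filter]
  simp

-- membership in a fold of set-growing steps
theorem pv_mem_foldl_step {α β : Type} [BEq α] [LawfulBEq α]
    (f : PySem.Set α → β → PySem.Set α) (P : β → α → Prop)
    (hf : ∀ s b y, y ∈ f s b ↔ y ∈ s ∨ P b y) :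
    ∀ (l : List β) (s : PySem.Set α) (y : α), y ∈ l.foldl f s ↔ y ∈ s ∨ ∃ b ∈ l, P b y := by
  intro l
  induction l with
  | nil => intro s y; simp
  | cons b rest ih =>
      intro s y
      simp only [List.foldl_cons, ih, hf, List.mem_cons]
      constructor
      · rintro ((h | h) | ⟨c, hc, hP⟩)
        · exact Or.inl h
        · exact Or.inr ⟨b, Or.inl rfl, h⟩
        · exact Or.inr ⟨c, Or.inr hc, hP⟩
      · rintro (h | ⟨c, (rfl | hc), hP⟩)
        · exact Or.inl (Or.inl h)
        · exact Or.inl (Or.inr hP)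
        · exact Or.inr ⟨c, hc, hP⟩

-- what the index contains
theorem pv_mem_subsIndex (asset_names : List String) (x : String) :
    x ∈ pvSubsIndex asset_names ↔
      ∃ name ∈ asset_names,
        ∃ i ∈ PySem.List.pyRange 0 (PySem.Str.len (PySem.Str.lower name) + 1),
          ∃ j ∈ PySem.List.pyRange i (PySem.Str.len (PySem.Str.lower name) + 1),
            PySem.Str.slice (PySem.Str.lower name) (some i) (some j) = x := by
  unfold pvSubsIndex
  rw [pv_mem_foldl_step
      (P := fun name y =>
        ∃ i ∈ PySem.List.pyRange 0 (PySem.Str.len (PySem.Str.lower name) + 1),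
          ∃ j ∈ PySem.List.pyRange i (PySem.Str.len (PySem.Str.lower name) + 1),
            PySem.Str.slice (PySem.Str.lower name) (some i) (some j) = y)]
  · simp [PySem.Set.empty]
  · intro s name y
    simp only
    rw [pv_mem_foldl_step
        (P := fun i y =>
          ∃ j ∈ PySem.List.pyRange i (PySem.Str.len (PySem.Str.lower name) + 1),
            PySem.Str.slice (PySem.Str.lower name) (some i) (some j) = y)]
    intro s' i y'
    rw [pv_mem_foldl_step
        (P := fun j y =>
          PySem.Str.slice (PySem.Str.lower name) (some i) (some j) = y)]
    intro s'' j y''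
    rw [PySem.Set.mem_add]
    constructor
    · rintro (h | h)
      · exact Or.inl h
      · exact Or.inr h.symm
    · rintro (h | h)
      · exact Or.inl h
      · exact Or.inr h.symm

-- the slices produced by the two ranges are exactly the infixes
theorem pv_slice_iff_infix (kw low : String) :
    (∃ i ∈ PySem.List.pyRange 0 (PySem.Str.len low + 1),
      ∃ j ∈ PySem.List.pyRange i (PySem.Str.len low + 1),
        PySem.Str.slice low (some i) (some j) = kw) ↔ kw.toList <:+: low.toList := by
  constructor
  · rintro ⟨i, hi, j, hj, hslice⟩
    rw [PySem.List.mem_pyRange_one] at hi hj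
    have h0i : 0 ≤ i := hi.1
    have h0j : 0 ≤ j := le_trans h0i hj.1
    have this1 : PySem.Chars.slice low.toList (some i) (some j) = kw.toList := by
      rw [← PySem.Str.toList_slice, hslice]
    have this2 : PySem.List.slice low.toList (some i) (some j) = kw.toList := this1
    rw [PySem.List.slice_toNat _ h0i h0j] at this2
    rw [← this2]
    exact ((List.take_prefix _ _).isInfix).trans ((List.drop_suffix _ _).isInfix)
  · rintro ⟨s, t, hst⟩
    have hlen : PySem.Str.len low = (low.toList.length : Int) := by
      simp [PySem.Str.len_eq]
    have hlow : s ++ (kw.toList ++ t) = low.toList := by simpa using hst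
    have hL : s.length + (kw.toList.length + t.length) = low.toList.length := by
      rw [← hlow]; simp
    refine ⟨(s.length : Int), ?_, (s.length : Int) + (kw.toList.length : Int), ?_, ?_⟩
    · rw [PySem.List.mem_pyRange_one]; constructor
      · positivity
      · rw [hlen]; omega
    · rw [PySem.List.mem_pyRange_one]; constructor
      · omega
      · rw [hlen]; omega
    · have : (PySem.Str.slice low (some (s.length : Int)) (some ((s.length : Int) + (kw.toList.length : Int)))).toList = kw.toList := by
        rw [PySem.Str.toList_slice]
        show PySem.List.slice low.toList (some (s.length:Int)) (some ((s.length:Int) + (kw.toList.length:Int))) = kw.toList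
        rw [PySem.List.slice_natCast_add]
        rw [← hlow]
        simp
      exact String.toList_inj.mp (by simpa using this)

-- ===== VERDICT (by name: the statement is the Claim_ definition above) =====
theorem match_keywords_to_assets_py_spec : Claim_equal_match_keywords_to_assets_py := by
  intro keywords asset_names _hDom
  unfold Spec_match_keywords_to_assets_py
  rw [pvA_eq_filter]
  unfold match_keywords_to_assets_py_alt
  simp only
  apply List.filter_congr
  intro kw _hk
  rw [Bool.eq_iff_iff]
  rw [List.any_eq_true]
  constructor
  · rintro ⟨name, hn, hin⟩
    rw [PySem.Set.contains_iff, pv_mem_subsIndex]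
    refine ⟨name, hn, ?_⟩
    rw [pv_slice_iff_infix]
    exact (PySem.Str.isIn_iff_infix _ _).mp hin
  · intro h
    rw [PySem.Set.contains_iff, pv_mem_subsIndex] at h
    obtain ⟨name, hn, hrest⟩ := h
    refine ⟨name, hn, ?_⟩
    rw [PySem.Str.isIn_iff_infix]
    exact (pv_slice_iff_infix kw _).mp hrest
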